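-- pv_equiv track=rewrite | github.com/dennlinger/klexikon | klexikon/processing/create_datasets_json_files.py | remove_empty_sections
-- ===== SOURCE A (Python) =====
-- def remove_empty_sections(lines):
--     """
--     Mainly relevant for Wikipedia articles, this removes sections without any actual textual content.
--     Notably, we leave in transfer from sections to subsections, subsections to subsubsections, etc.
--     """
--     new_lines = []
--
--     curr_section_depth = "="
--     curr_section_is_empty = True
--     curr_section_lines = []
--
--     for line in lines:
--         # Encountering start of new section
--         if line.startswith("="):
--             # Current new section is a subsection, so we don't care if it is empty
--             if len(curr_section_depth) < len(line.split(" ")[0]) or not curr_section_is_empty: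
--                 new_lines.extend(curr_section_lines)
--             # if it is a section of same depth, and there had not been any content, remove
--             elif len(curr_section_depth) >= len(line.split(" ")[0]) and curr_section_is_empty:
--                 # don't add it to content, and reset for next block
--                 pass
--             else:
--                 raise ValueError(f"Found uncovered edge case: "
--                                  f"{curr_section_is_empty}, {curr_section_depth}, {curr_section_lines}")
--
--             curr_section_is_empty = True
--             curr_section_depth = line.split(" ")[0]  # only take the "===" part
--             curr_section_lines = []
--
--         curr_section_lines.append(line)
--         # Mark relevant lines as textual content
--         if line != "" and not line.startswith("="):
--             curr_section_is_empty = False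
--
--     # Add last section
--     if not curr_section_is_empty:
--         new_lines.extend(curr_section_lines)
--
--     return new_lines
-- ===== SOURCE B (Python) =====
-- def remove_empty_sections(lines):
--     """Two-pass rewrite: split lines into section records, then emit each section
--     that has textual content or is immediately followed by a deeper section."""
--     sections = []
--     depth, nonempty, cur = 1, False, []
--     for line in lines:
--         if line.startswith("="):
--             sections.append((depth, nonempty, cur))
--             depth, nonempty, cur = len(line.split(" ")[0]), False, [line]
--         else:
--             cur.append(line)
--             if line != "":
--                 nonempty = True
--     sections.append((depth, nonempty, cur))
--
--     out = []
--     for i, (d, ne, sec) in enumerate(sections):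
--         if ne or (i + 1 < len(sections) and d < sections[i + 1][0]):
--             out.extend(sec)
--     return out
-- ===== Notes on version B (the rewrite author's own statement) =====
-- stated objective: alternative
-- what changed: Replaces A's single-pass state machine (interleaving emission decisions with scanning) by a two-pass decomposition: first sectionize the lines into (depth, has_content, lines) records, then emit each section whose content flag is set or whose successor record is strictly deeper.
import Mathlib
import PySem

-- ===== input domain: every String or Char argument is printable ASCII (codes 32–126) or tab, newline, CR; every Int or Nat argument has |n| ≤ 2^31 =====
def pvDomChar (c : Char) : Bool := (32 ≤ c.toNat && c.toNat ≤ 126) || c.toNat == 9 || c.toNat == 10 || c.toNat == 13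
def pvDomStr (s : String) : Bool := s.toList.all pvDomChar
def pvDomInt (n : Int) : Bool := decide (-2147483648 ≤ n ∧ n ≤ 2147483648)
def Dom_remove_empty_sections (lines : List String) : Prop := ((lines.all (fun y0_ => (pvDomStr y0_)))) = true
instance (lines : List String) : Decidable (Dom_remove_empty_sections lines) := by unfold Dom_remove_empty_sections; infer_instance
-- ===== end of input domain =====

-- B replaces A's one-pass state machine by a two-pass decomposition (sectionize, then emit
-- with a one-record lookahead); objective: alternative (same cost, plainer structure).

-- ===== PORT A =====
-- line.split(" ")[0]: split never returns an empty list, so [0] cannot raise; ported as headD "".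
def pyFirstTok (line : String) : String :=
  ((PySem.Str.split? line " ").getD []).headD ""

-- the loop of A, carried state (new_lines, curr_section_depth, curr_section_is_empty, curr_section_lines);
-- the final 'raise ValueError' branch of A is unreachable (the elif is the exact negation of the if) and so has no counterpart.
def remove_empty_sections_go : List String → List String → String → Bool → List String → List String
  | [], newLines, _, isEmpty, secLines =>
      if isEmpty = false then newLines ++ secLines else newLines
  | line :: rest, newLines, depth, isEmpty, secLines =>
      let st :=
        if PySem.Str.startswith line "=" then
          let tok := pyFirstTok line
          ((if PySem.Str.len depth < PySem.Str.len tok ∨ isEmpty = false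
            then newLines ++ secLines else newLines), tok, true, ([] : List String))
        else (newLines, depth, isEmpty, secLines)
      remove_empty_sections_go rest st.1 st.2.1
        (if line ≠ "" ∧ PySem.Str.startswith line "=" = false then false else st.2.2.1)
        (st.2.2.2 ++ [line])

def remove_empty_sections (lines : List String) : List String :=
  remove_empty_sections_go lines [] "=" true []

-- ===== PORT B =====
-- first pass of B: section records (depth, has_content, lines)
def sectionizeB : List String → Int → Bool → List String → List (Int × Bool × List String)
  | [], depth, ne, cur => [(depth, ne, cur)]
  | line :: rest, depth, ne, cur =>
      if PySem.Str.startswith line "=" then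
        (depth, ne, cur) :: sectionizeB rest (PySem.Str.len (pyFirstTok line)) false [line]
      else
        sectionizeB rest depth (if line ≠ "" then true else ne) (cur ++ [line])

-- second pass of B: emit a section iff it has content or the next section is deeper
def emitB : List (Int × Bool × List String) → List String
  | [] => []
  | (d, ne, sec) :: rest =>
      (if ne || (match rest with | (d', _, _) :: _ => decide (d < d') | [] => false)
       then sec else []) ++ emitB rest

def remove_empty_sections_alt (lines : List String) : List String :=
  emitB (sectionizeB lines 1 false [])

-- ===== PRECONDITION & SPEC =====
def Spec_remove_empty_sections (lines : List String) (out : List String) : Prop := out = remove_empty_sections_alt lines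
instance (lines : List String) (out : List String) : Decidable (Spec_remove_empty_sections lines out) := by unfold Spec_remove_empty_sections; infer_instance

-- ===== CLAIM (what is proved, stated in full; the proofs are below) =====
def Claim_equal_remove_empty_sections : Prop := ∀ (lines : List String), Dom_remove_empty_sections lines → Spec_remove_empty_sections lines (remove_empty_sections lines)

-- ===== LEMMAS AND PROOFS =====

-- the first record produced by sectionizeB carries the depth it was started with
lemma sectionizeB_head : ∀ (lines : List String) (d : Int) (ne : Bool) (cur : List String),
    ∃ ne' cur' rest, sectionizeB lines d ne cur = (d, ne', cur') :: rest := by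
  intro lines
  induction lines with
  | nil => intro d ne cur; exact ⟨ne, cur, [], rfl⟩
  | cons line rest ih =>
      intro d ne cur
      by_cases h : PySem.Str.startswith line "=" = true
      · exact ⟨ne, cur, sectionizeB rest (PySem.Str.len (pyFirstTok line)) false [line],
          by simp only [sectionizeB, h, if_true]⟩
      · have h' : PySem.Str.startswith line "=" = false := by simpa using h
        obtain ⟨ne', cur', r, hr⟩ := ih d (if line ≠ "" then true else ne) (cur ++ [line])
        exact ⟨ne', cur', r, by
          simp only [sectionizeB, h', Bool.false_eq_true, if_false]; exact hr⟩

lemma go_eq : ∀ (lines newLines : List String) (depth : String) (isEmpty : Bool) (secLines : List String),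
    remove_empty_sections_go lines newLines depth isEmpty secLines
      = newLines ++ emitB (sectionizeB lines (PySem.Str.len depth) (!isEmpty) secLines) := by
  intro lines
  induction lines with
  | nil =>
      intro nl depth e sl
      cases e <;> simp [remove_empty_sections_go, sectionizeB, emitB]
  | cons line rest ih =>
      intro nl depth e sl
      by_cases h : PySem.Str.startswith line "=" = true
      · have h2 : PySem.Chars.startswith line.toList ['='] = true := by simpa using h
        obtain ⟨ne', cur', r, hr⟩ :=
          sectionizeB_head rest (PySem.Str.len (pyFirstTok line)) false [line]
        have hr' : sectionizeB rest (((pyFirstTok line).length : Int)) false [line]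
            = ((((pyFirstTok line).length : Int)), ne', cur') :: r := by simpa using hr
        simp only [remove_empty_sections_go]
        by_cases hc : ((depth.length : Int)) < (((pyFirstTok line).length : Int)) <;>
          cases e <;> simp [h2, ih, sectionizeB, hr', emitB, hc]
      · have h' : PySem.Str.startswith line "=" = false := by simpa using h
        have h2 : PySem.Chars.startswith line.toList ['='] = false := by simpa using h'
        have hx : PySem.Chars.startswith ([] : List Char) ['='] = false := by decide
        simp only [remove_empty_sections_go]
        by_cases hl : line = "" <;> cases e <;> simp [h2, hx, ih, sectionizeB, hl]

theorem pv_main (lines : List String) :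
    remove_empty_sections lines = remove_empty_sections_alt lines := by
  simp [remove_empty_sections, remove_empty_sections_alt, go_eq]

-- ===== VERDICT (by name: the statement is the Claim_ definition above) =====
theorem remove_empty_sections_spec : Claim_equal_remove_empty_sections := by
  intro lines _
  unfold Spec_remove_empty_sections
  exact pv_main lines
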